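-- pv_equiv track=rewrite | github.com/centenohugo/Project-Barcelona | fluidity_analysis.py | _sentence_positions
-- ===== SOURCE A (Python) =====
-- def _sentence_positions(words: list[dict]) -> list[str]:
--     """
--     Return a list of the same length as words, each entry being:
--       'initial'  — first word of its sentence
--       'final'    — last word of its sentence
--       'middle'   — any other position
--     """
--     n = len(words)
--     positions: list[str] = ["middle"] * n
--     for i, w in enumerate(words):
--         sid = w["sentence_id"]
--         is_first = (i == 0) or (words[i - 1]["sentence_id"] != sid)
--         is_last  = (i == n - 1) or (words[i + 1]["sentence_id"] != sid)
--         if is_first and is_last: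
--             positions[i] = "initial"   # single-word sentence
--         elif is_first:
--             positions[i] = "initial"
--         elif is_last:
--             positions[i] = "final"
--     return positions
-- ===== SOURCE B (Python) =====
-- def _sentence_positions(words: list[dict]) -> list[str]:
--     """Run-based re-implementation: segment the word list into maximal runs of
--     consecutive equal sentence_id and emit each run's label block directly."""
--     sids = [w["sentence_id"] for w in words]
--     res: list[str] = []
--     i = 0
--     n = len(sids)
--     while i < n:
--         k = i + 1
--         while k < n and sids[k] == sids[i]:
--             k += 1
--         run_len = k - i
--         if run_len == 1:
--             res.append("initial")  # single-word sentence: initial wins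
--         else:
--             res += ["initial"] + ["middle"] * (run_len - 2) + ["final"]
--         i = k
--     return res
-- ===== Notes on version B (the rewrite author's own statement) =====
-- stated objective: alternative
-- what changed: Instead of A's per-index loop that compares each word with both neighbours and overwrites a preallocated 'middle' list, B segments the list once into maximal runs of consecutive equal sentence_id and emits each run's label block ('initial' + middles + 'final', with a lone 'initial' for single-word runs) directly.
import Mathlib
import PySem

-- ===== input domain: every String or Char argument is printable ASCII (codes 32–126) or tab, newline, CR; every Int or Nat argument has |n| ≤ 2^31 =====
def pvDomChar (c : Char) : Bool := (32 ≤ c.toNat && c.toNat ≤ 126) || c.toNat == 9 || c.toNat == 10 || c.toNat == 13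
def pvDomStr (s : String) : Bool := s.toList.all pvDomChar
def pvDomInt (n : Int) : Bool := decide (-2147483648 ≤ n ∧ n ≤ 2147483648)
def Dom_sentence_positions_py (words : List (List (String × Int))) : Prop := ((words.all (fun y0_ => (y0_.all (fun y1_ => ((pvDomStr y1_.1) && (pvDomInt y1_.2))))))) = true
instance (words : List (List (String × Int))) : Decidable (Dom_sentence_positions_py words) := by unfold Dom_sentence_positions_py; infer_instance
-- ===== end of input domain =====

-- B replaces A's per-index neighbour-comparison loop by a single run-segmentation pass
-- (maximal runs of equal sentence_id, each emitted as 'initial' + middles + 'final'); objective: alternative.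

-- ===== PORT A =====
-- dict lookup w["sentence_id"] (first match; none = KeyError, excluded by Pre_)
def pvSid (w : List (String × Int)) : Option Int := (PySem.Dict.mk w).get? "sentence_id"

def sentence_positions_py (words : List (List (String × Int))) : List String :=
  let n := words.length
  -- positions = ["middle"]*n; each slot i is written at most once in the loop,
  -- so the loop is transcribed as a map over the indices producing slot i's final value.
  (List.range n).map (fun i =>
    let sid := pvSid (words.getD i [])
    let is_first := i == 0 || pvSid (words.getD (i - 1) []) != sid
    let is_last := i == n - 1 || pvSid (words.getD (i + 1) []) != sid
    if is_first && is_last then "initial"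
    else if is_first then "initial"
    else if is_last then "final"
    else "middle")

-- ===== PORT B =====
-- the outer while loop of Source B: consume one maximal run of equal sids per step
def pvRunsGo : List (Option Int) → List String
  | [] => []
  | s :: rest =>
    let t := rest.takeWhile (fun x => x == s)
    let d := rest.dropWhile (fun x => x == s)
    let k := t.length + 1
    (if k == 1 then ["initial"]
     else "initial" :: (List.replicate (k - 2) "middle" ++ ["final"])) ++ pvRunsGo d
termination_by l => l.length
decreasing_by
  simp only [List.length_cons]
  exact Nat.lt_succ_of_le (List.length_dropWhile_le _ _)

def sentence_positions_py_alt (words : List (List (String × Int))) : List String :=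
  pvRunsGo (words.map pvSid)

-- ===== PRECONDITION & SPEC =====
-- Pre_ excludes exactly the inputs where a word dict lacks the key "sentence_id",
-- on which Python A raises KeyError (B raises there too).
def Pre_sentence_positions_py (words : List (List (String × Int))) : Prop :=
  ∀ w ∈ words, w.any (fun p => p.1 == "sentence_id")

instance (words : List (List (String × Int))) : Decidable (Pre_sentence_positions_py words) := by
  unfold Pre_sentence_positions_py; infer_instance

def pvWitness_sentence_positions_py : (List (List (String × Int))) :=
  [[("sentence_id", 1)], [("sentence_id", 1)], [("sentence_id", 2)]]

def Spec_sentence_positions_py (words : List (List (String × Int))) (out : List String) : Prop := out = sentence_positions_py_alt words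
instance (words : List (List (String × Int))) (out : List String) : Decidable (Spec_sentence_positions_py words out) := by unfold Spec_sentence_positions_py; infer_instance

-- ===== CLAIM (what is proved, stated in full; the proofs are below) =====
def Claim_equal_sentence_positions_py : Prop := ∀ (words : List (List (String × Int))), Dom_sentence_positions_py words → Pre_sentence_positions_py words → Spec_sentence_positions_py words (sentence_positions_py words)

-- ===== LEMMAS AND PROOFS =====

-- the label of position i, read off the sid sequence
def pvLab (s : List (Option Int)) (i : Nat) : String :=
  if i = 0 ∨ s.getD (i - 1) none ≠ s.getD i none then "initial"
  else if i = s.length - 1 ∨ s.getD (i + 1) none ≠ s.getD i none then "final"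
  else "middle"

lemma pvSid_nil : pvSid [] = none := rfl

lemma sid_getD (words : List (List (String × Int))) (j : Nat) :
    pvSid (words.getD j []) = (words.map pvSid).getD j none := by
  simp only [List.getD, List.getElem?_map]
  cases words[j]? <;> simp [pvSid_nil]

lemma A_eq_lab (words : List (List (String × Int))) :
    sentence_positions_py words = (List.range words.length).map (pvLab (words.map pvSid)) := by
  unfold sentence_positions_py
  apply List.map_congr_left
  intro i hi
  simp only [List.mem_range] at hi
  simp only [sid_getD, pvLab, List.length_map, Bool.or_eq_true, Bool.and_eq_true,
    beq_iff_eq, bne_iff_ne, ne_eq]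
  split_ifs <;> tauto

-- getD of a replicate-run followed by a tail
lemma getD_rep_app (k : Nat) (a : Option Int) (d : List (Option Int)) (j : Nat) :
    (List.replicate k a ++ d).getD j none = if j < k then a else d.getD (j - k) none := by
  unfold List.getD
  rcases Nat.lt_or_ge j k with h | h
  · rw [List.getElem?_append_left (by simpa using h)]
    simp [h]
  · rw [List.getElem?_append_right (by simpa using h)]
    simp [List.length_replicate, Nat.not_lt.mpr h]

-- core: the run decomposition computes pvLab everywhere
lemma runsGo_eq (s : List (Option Int)) :
    pvRunsGo s = (List.range s.length).map (pvLab s) := by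
  induction s using pvRunsGo.induct with
  | case1 => simp [pvRunsGo]
  | case2 a rest d0 ih =>
    set t := rest.takeWhile (fun x => x == a) with htdef
    set d := rest.dropWhile (fun x => x == a) with hddef
    set k := t.length + 1 with hkdef
    have hd0 : d0 = d := rfl
    rw [hd0] at ih
    have hsplit : t ++ d = rest := by
      rw [htdef, hddef]; exact List.takeWhile_append_dropWhile
    have ht : ∀ b ∈ t, b = a := fun b hb => by
      have := List.mem_takeWhile_imp hb; simpa using this
    have htr : t = List.replicate t.length a := List.eq_replicate_of_mem ht
    have hd : ∀ b, d.head? = some b → b ≠ a := by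
      intro b hb
      have := List.head?_dropWhile_not (fun x => x == a) rest
      rw [← hddef, hb] at this
      simpa using this
    have hs : a :: rest = List.replicate k a ++ d := by
      rw [← hsplit, htr]
      simp [k, List.replicate_succ]
    -- getD facts
    have hget : ∀ j, (a :: rest).getD j none = if j < k then a else d.getD (j - k) none := by
      intro j; rw [hs]; exact getD_rep_app k a d j
    have hlen : (a :: rest).length = k + d.length := by
      rw [hs]; simp
    have hk1 : 1 ≤ k := Nat.le_add_left 1 t.length
    -- head of d differs from a (when d nonempty)
    have hdne : ∀ (h : d ≠ []), d.getD 0 none ≠ a := by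
      intro h
      obtain ⟨b, bd, hbd⟩ := List.exists_cons_of_ne_nil h
      rw [hbd]
      simpa using hd b (by rw [hbd]; rfl)
    rw [pvRunsGo, ← htdef, ← hddef, ← hkdef, ih]
    -- split range (k + d.length)
    have hrange : (List.range (a :: rest).length).map (pvLab (a :: rest))
        = (List.range k).map (pvLab (a :: rest))
          ++ (List.range d.length).map (fun j => pvLab (a :: rest) (k + j)) := by
      rw [hlen, List.range_add, List.map_append, List.map_map]; rfl
    rw [hrange]
    congr 1
    · -- the run block
      have hlab : ∀ i < k, pvLab (a :: rest) i
          = if i = 0 then "initial" else if i = k - 1 then "final" else "middle" := by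
        intro i hik
        unfold pvLab
        rw [hlen]
        by_cases hi0 : i = 0
        · rw [if_pos (Or.inl hi0), if_pos hi0]
        · have hfirstne : ¬ (i = 0 ∨ (a :: rest).getD (i - 1) none ≠ (a :: rest).getD i none) := by
            push Not
            refine ⟨hi0, ?_⟩
            rw [hget, hget, if_pos hik, if_pos (by omega)]
          rw [if_neg hfirstne, if_neg hi0]
          by_cases hil : i = k - 1
          · rw [if_pos, if_pos hil]
            by_cases hdnil : d = []
            · left; simp [hdnil]; omega
            · right
              rw [hget, hget, if_pos hik, if_neg (by omega), show i + 1 - k = 0 by omega]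
              exact hdne hdnil
          · rw [if_neg, if_neg hil]
            push Not
            constructor
            · have : 0 < d.length ∨ d.length = 0 := by omega
              omega
            · rw [hget, hget, if_pos hik, if_pos (by omega)]
      rw [List.map_congr_left (fun i hi => hlab i (List.mem_range.mp hi))]
      -- now compute the explicit block
      by_cases hk : k = 1
      · simp [hk]
      · rw [if_neg (by simpa using hk)]
        have hk2 : 2 ≤ k := by omega
        apply List.ext_getElem
        · simp; omega
        · intro i h1 h2
          simp only [List.getElem_map, List.getElem_range]
          rcases Nat.lt_or_ge i 1 with hi | hi
          · interval_cases i
            simp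
          · obtain ⟨j, rfl⟩ : ∃ j, i = j + 1 := ⟨i - 1, by omega⟩
            simp only [List.getElem_cons_succ]
            rcases Nat.lt_or_ge (j + 1) (k - 1) with hik | hik
            · rw [if_neg (by omega), if_neg (by omega)]
              rw [List.getElem_append_left (by simp; omega)]
              simp
            · have hje : j + 1 = k - 1 := by simp at h1; omega
              rw [if_neg (by omega), if_pos hje]
              rw [List.getElem_append_right (by simp; omega)]
              simp
    · -- the shifted tail
      apply List.map_congr_left
      intro j hj
      simp only [List.mem_range] at hj
      unfold pvLab
      rw [hlen]
      have e0 : (a :: rest).getD (k + j) none = d.getD j none := by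
        rw [hget, if_neg (by omega)]; congr 1; omega
      have e2 : (a :: rest).getD (k + j + 1) none = d.getD (j + 1) none := by
        rw [hget, if_neg (by omega)]; congr 1; omega
      by_cases hj0 : j = 0
      · subst hj0
        have hfirst : (a :: rest).getD (k + 0 - 1) none ≠ (a :: rest).getD (k + 0) none := by
          rw [e0, hget, if_pos (by omega)]
          have hdnil : d ≠ [] := by intro h; rw [h] at hj; simp at hj
          exact fun h => hdne hdnil h.symm
        rw [if_pos (Or.inr hfirst), if_pos (Or.inl rfl)]
      · have e1 : (a :: rest).getD (k + j - 1) none = d.getD (j - 1) none := by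
          rw [hget, if_neg (by omega)]; congr 1; omega
        rw [e0, e1, e2]
        have hiff1 : (k + j = 0 ∨ d.getD (j - 1) none ≠ d.getD j none)
            ↔ (j = 0 ∨ d.getD (j - 1) none ≠ d.getD j none) := by
          constructor <;> rintro (h | h) <;> first | omega | exact Or.inr h
        have hiff2 : (k + j = k + d.length - 1 ∨ d.getD (j + 1) none ≠ d.getD j none)
            ↔ (j = d.length - 1 ∨ d.getD (j + 1) none ≠ d.getD j none) := by
          constructor <;> rintro (h | h) <;> first | (left; omega) | exact Or.inr h
        rw [if_congr hiff1 rfl rfl, if_congr hiff2 rfl rfl]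

-- ===== VERDICT (by name: the statement is the Claim_ definition above) =====
theorem sentence_positions_py_spec : Claim_equal_sentence_positions_py := by
  intro words _ _
  unfold Spec_sentence_positions_py sentence_positions_py_alt
  rw [A_eq_lab, runsGo_eq, List.length_map]
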